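-- pv_equiv track=rewrite | github.com/0xStryK3R/Scaler-DSA-Revision | python/Day-35/HW_3.py | solve
-- ===== SOURCE A (Python) =====
-- def solve(A):
--     ans = 0
--     bit_pos = 0
--
--     # For smaller number (B), flip just the existing bits in A
--     while A >> bit_pos:
--         ans += ((A >> bit_pos) & 1 ^ 1) << bit_pos
--         bit_pos += 1
--
--     # The larger number (C), will just be next higher power of 2
--     # Also, simply adding will suffice, since B and C will not have
--     # the same set bits.
--     ans += 1 << bit_pos
--     return ans
-- ===== SOURCE B (Python) =====
-- def solve(A):
--     # closed form: flipping A's bits within its bit_length gives 2^L - 1 - A;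
--     # adding the next power of two 2^L gives 2^(L+1) - 1 - A.
--     return (1 << (A.bit_length() + 1)) - 1 - A
-- ===== Notes on version B (the rewrite author's own statement) =====
-- stated objective: simpler
-- what changed: Replaced the per-bit while loop with a direct closed-form expression computed from A.bit_length(), with no iteration.
import Mathlib
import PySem

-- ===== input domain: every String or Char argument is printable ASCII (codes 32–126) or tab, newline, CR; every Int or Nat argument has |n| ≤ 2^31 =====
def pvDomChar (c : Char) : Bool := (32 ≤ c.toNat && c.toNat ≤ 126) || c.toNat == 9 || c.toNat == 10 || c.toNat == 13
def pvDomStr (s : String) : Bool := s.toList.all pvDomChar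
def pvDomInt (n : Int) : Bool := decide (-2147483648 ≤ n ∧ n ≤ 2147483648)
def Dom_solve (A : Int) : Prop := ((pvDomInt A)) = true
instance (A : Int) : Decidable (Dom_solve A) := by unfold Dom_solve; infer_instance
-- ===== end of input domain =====

-- B replaces A's per-bit while loop with a closed form computed from A.bit_length() (simpler; equal wherever A returns).
-- Pre_solve excludes negative A, on which Python A loops forever (A >> k is eventually -1, always truthy).


-- ===== PORT A =====
-- the while loop of A, on the Nat value of A (exact for A ≥ 0; negative A is
-- outside Pre_solve, where Python's loop never terminates); returns (ans, bit_pos)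
def solveLoop (a : Nat) (bitPos : Nat) (ans : Int) : Int × Nat :=
  if h : a >>> bitPos = 0 then (ans, bitPos)
  else solveLoop a (bitPos + 1) (ans + (((((a >>> bitPos) &&& 1) ^^^ 1) <<< bitPos : Nat) : Int))
termination_by a >>> bitPos
decreasing_by
  simp only [Nat.shiftRight_succ]
  exact Nat.div_lt_self (Nat.pos_of_ne_zero h) one_lt_two

def solve (A : Int) : Int :=
  let r := solveLoop A.toNat 0 0
  r.1 + ((1 <<< r.2 : Nat) : Int)

-- ===== PORT B =====
def solve_alt (A : Int) : Int := ((1 <<< (A.toNat.size + 1) : Nat) : Int) - 1 - A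

-- ===== PRECONDITION & SPEC =====
-- Pre_solve excludes negative A: there Python A never returns (infinite loop).
def Pre_solve (A : Int) : Prop := 0 ≤ A
instance (A : Int) : Decidable (Pre_solve A) := by unfold Pre_solve; infer_instance
def pvWitness_solve : Int := (5)
def Spec_solve (A : Int) (out : Int) : Prop := out = solve_alt A
instance (A : Int) (out : Int) : Decidable (Spec_solve A out) := by unfold Spec_solve; infer_instance

-- ===== CLAIM (what is proved, stated in full; the proofs are below) =====
def Claim_equal_solve : Prop := ∀ (A : Int), Dom_solve A → Pre_solve A → Spec_solve A (solve A)

-- ===== LEMMAS AND PROOFS =====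

-- characterisation of the loop: it stops at bit position max n.size k, having
-- added the complement of n's bits in positions [k, size)
theorem solveLoop_eq (a : Nat) (bitPos : Nat) (ans : Int) :
    solveLoop a bitPos ans =
      (ans + ((2 ^ (max a.size bitPos) : Nat) : Int) - ((2 ^ bitPos : Nat) : Int)
         - (a : Int) + ((a % 2 ^ bitPos : Nat) : Int),
       max a.size bitPos) := by
  fun_induction solveLoop a bitPos ans with
  | case1 k ans h =>
    have hdiv : a >>> k = a / 2 ^ k := Nat.shiftRight_eq_div_pow a k
    have h2 : 0 < 2 ^ k := Nat.two_pow_pos k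
    have hlt : a < 2 ^ k := by
      rw [hdiv] at h
      rcases (Nat.div_eq_zero_iff).mp h with h0 | h0
      · omega
      · exact h0
    have hsz : a.size ≤ k := Nat.size_le.mpr hlt
    rw [Nat.max_eq_right hsz, Nat.mod_eq_of_lt hlt, Prod.mk.injEq]
    refine ⟨?_, rfl⟩
    push_cast
    ring
  | case2 k ans h ih =>
    rw [ih]
    have hdiv : a >>> k = a / 2 ^ k := Nat.shiftRight_eq_div_pow a k
    have hklt : k < a.size := by
      by_contra hc
      exact h (by rw [hdiv]; exact Nat.div_eq_of_lt (Nat.size_le.mp (by omega)))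
    have hmax1 : max a.size (k + 1) = a.size := Nat.max_eq_left (by omega)
    have hmax0 : max a.size k = a.size := Nat.max_eq_left (by omega)
    have hand : a >>> k &&& 1 = a / 2 ^ k % 2 := by rw [hdiv, Nat.and_one_is_mod]
    have hmod : a % 2 ^ (k + 1) = a % 2 ^ k + 2 ^ k * (a / 2 ^ k % 2) := by
      rw [pow_succ, Nat.mod_mul]
    rcases Nat.mod_two_eq_zero_or_one (a / 2 ^ k) with hb | hb <;>
      [ (rw [hmax1, hmax0, Prod.mk.injEq]
         refine ⟨?_, rfl⟩
         rw [hand, hb, hmod, hb, Nat.shiftLeft_eq]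
         simp only [Nat.zero_xor]
         push_cast
         ring);
        (rw [hmax1, hmax0, Prod.mk.injEq]
         refine ⟨?_, rfl⟩
         rw [hand, hb, hmod, hb, Nat.shiftLeft_eq]
         simp only [Nat.xor_self]
         push_cast
         ring) ]

-- ===== VERDICT (by name: the statement is the Claim_ definition above) =====
theorem solve_spec : Claim_equal_solve := by
  intro A _ hA
  unfold Spec_solve solve solve_alt
  rw [solveLoop_eq]
  simp [Nat.shiftLeft_eq, Int.toNat_of_nonneg hA]
  ring
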